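-- pv_equiv track=rewrite | github.com/mcainshcameron/SPL | src/site/slugs.py | ensure_unique_slugs
-- ===== SOURCE A (Python) =====
-- from typing import Dict, Tuple
--
-- def ensure_unique_slugs(player_names: Dict[str, Dict[str, str]]) -> Dict[str, Dict[str, str]]:
--     """
--     Ensure all slugs are unique by adding numbers to duplicates.
--
--     Args:
--         player_names: Dict from generate_player_names()
--
--     Returns:
--         Updated dict with unique slugs
--     """
--     slug_counts: Dict[str, int] = {}
--     slug_mapping: Dict[str, str] = {}
--
--     # First pass: count slug occurrences
--     for full_name, data in player_names.items():
--         slug = data['slug']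
--         slug_counts[slug] = slug_counts.get(slug, 0) + 1
--
--     # Second pass: add numbers to duplicates
--     slug_usage: Dict[str, int] = {}
--
--     for full_name, data in player_names.items():
--         slug = data['slug']
--
--         if slug_counts[slug] > 1:
--             # This slug appears multiple times
--             usage = slug_usage.get(slug, 0) + 1
--             slug_usage[slug] = usage
--
--             # Add number suffix
--             unique_slug = f"{slug}-{usage}"
--             player_names[full_name]['slug'] = unique_slug
--
--     return player_names
-- ===== SOURCE B (Python) =====
-- def ensure_unique_slugs(player_names):
--     """Group full names by slug, then renumber every group of duplicates."""
--     groups = {}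
--     for full_name, data in player_names.items():
--         groups.setdefault(data['slug'], []).append(full_name)
--
--     for slug, members in groups.items():
--         if len(members) > 1:
--             i = 1
--             for name in members:
--                 player_names[name]['slug'] = f"{slug}-{i}"
--                 i += 1
--
--     return player_names
-- ===== Notes on version B (the rewrite author's own statement) =====
-- stated objective: simpler
-- what changed: Replaces A's two counting dicts (slug_counts, slug_usage) and two passes over the whole mapping with a single grouping dict slug -> ordered list of names, then renumbers only the duplicate groups group-by-group.
import Mathlib
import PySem

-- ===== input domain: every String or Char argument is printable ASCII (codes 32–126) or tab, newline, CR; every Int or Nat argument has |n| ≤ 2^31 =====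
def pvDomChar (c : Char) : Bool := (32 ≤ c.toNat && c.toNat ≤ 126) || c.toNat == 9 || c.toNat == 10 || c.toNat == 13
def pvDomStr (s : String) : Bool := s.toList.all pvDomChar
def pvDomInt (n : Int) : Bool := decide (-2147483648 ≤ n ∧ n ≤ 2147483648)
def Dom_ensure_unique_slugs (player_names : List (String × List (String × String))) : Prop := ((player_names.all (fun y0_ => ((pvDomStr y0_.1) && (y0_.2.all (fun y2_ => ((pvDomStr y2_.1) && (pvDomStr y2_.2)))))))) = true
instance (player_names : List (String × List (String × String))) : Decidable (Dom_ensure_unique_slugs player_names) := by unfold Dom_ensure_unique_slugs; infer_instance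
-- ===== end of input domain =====

-- B replaces A's two counting dicts and two full passes with one grouping dict
-- slug -> ordered member names, renumbering only the duplicate groups (objective:
-- simpler).  Both Pythons mutate player_names in place and return it; the
-- equivalence proved here is about the returned mapping.

-- data['slug'] of an inner dict (Pre_ guarantees the key is present)
def pvSlug (d : List (String × String)) : String :=
  ((PySem.Dict.mk d).get? "slug").getD ""

-- ===== PORT A =====
-- second-pass loop body: state = (slug_usage, player_names-as-dict); the Python
-- mutates data (= player_names[full_name], the same object) in place, ported as
-- an overwrite-insert at the current key
def pvStepA (counts : PySem.Dict String Int)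
    (st : PySem.Dict String Int × PySem.Dict String (List (String × String)))
    (p : String × List (String × String)) :
    PySem.Dict String Int × PySem.Dict String (List (String × String)) :=
  if counts.getD (pvSlug p.2) 0 > 1 then
    (st.1.insert (pvSlug p.2) (st.1.getD (pvSlug p.2) 0 + 1),
     st.2.insert p.1
       ((PySem.Dict.mk p.2).insert "slug"
         (pvSlug p.2 ++ "-" ++ PySem.Int.toStr (st.1.getD (pvSlug p.2) 0 + 1))).items)
  else st

def ensure_unique_slugs (player_names : List (String × List (String × String))) :
    List (String × List (String × String)) :=
  let slug_counts : PySem.Dict String Int :=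
    player_names.foldl
      (fun c p => c.insert (pvSlug p.2) (c.getD (pvSlug p.2) 0 + 1)) PySem.Dict.empty
  ((player_names.foldl (pvStepA slug_counts)
      (PySem.Dict.empty, PySem.Dict.mk player_names)).2).items

-- ===== PORT B =====
-- inner loop of Source B over one duplicate group: state = (i, player_names-as-dict)
def pvStepBInner (slug : String)
    (st : Int × PySem.Dict String (List (String × String))) (name : String) :
    Int × PySem.Dict String (List (String × String)) :=
  (st.1 + 1,
   st.2.modify name []
     (fun d => ((PySem.Dict.mk d).insert "slug"
        (slug ++ "-" ++ PySem.Int.toStr st.1)).items))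

-- outer loop of Source B over groups.items()
def pvStepB (pm : PySem.Dict String (List (String × String)))
    (g : String × List String) : PySem.Dict String (List (String × String)) :=
  if g.2.length > 1 then (g.2.foldl (pvStepBInner g.1) (1, pm)).2 else pm

def ensure_unique_slugs_alt (player_names : List (String × List (String × String))) :
    List (String × List (String × String)) :=
  let groups : PySem.Dict String (List String) :=
    player_names.foldl
      (fun g p => g.modify (pvSlug p.2) [] (fun l => l ++ [p.1])) PySem.Dict.empty
  (groups.items.foldl pvStepB (PySem.Dict.mk player_names)).items

-- ===== PRECONDITION & SPEC =====
-- Pre_ excludes inner dicts without a 'slug' key (there A raises KeyError, and so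
-- does B) and association lists with duplicate outer or inner keys (those are not
-- representable as the Python dicts A receives).
def Pre_ensure_unique_slugs (player_names : List (String × List (String × String))) : Prop :=
  (player_names.map Prod.fst).Nodup ∧
  ∀ p ∈ player_names, (p.2.map Prod.fst).Nodup ∧ "slug" ∈ p.2.map Prod.fst

instance (player_names : List (String × List (String × String))) :
    Decidable (Pre_ensure_unique_slugs player_names) := by
  unfold Pre_ensure_unique_slugs; infer_instance

def pvWitness_ensure_unique_slugs : (List (String × List (String × String))) :=
  [("Al Ba", [("slug", "al-ba")]), ("Al  Ba", [("slug", "al-ba")]),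
   ("Cy De", [("slug", "cy-de")])]

def Spec_ensure_unique_slugs (player_names : List (String × List (String × String)))
    (out : List (String × List (String × String))) : Prop :=
  out = ensure_unique_slugs_alt player_names
instance (player_names : List (String × List (String × String)))
    (out : List (String × List (String × String))) :
    Decidable (Spec_ensure_unique_slugs player_names out) := by
  unfold Spec_ensure_unique_slugs; infer_instance

-- ===== CLAIM (what is proved, stated in full; the proofs are below) =====
def Claim_equal_ensure_unique_slugs : Prop :=
  ∀ (player_names : List (String × List (String × String))),
    Dom_ensure_unique_slugs player_names → Pre_ensure_unique_slugs player_names →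
    Spec_ensure_unique_slugs player_names (ensure_unique_slugs player_names)

-- ===== LEMMAS AND PROOFS =====

def pvSlugs (l : List (String × List (String × String))) : List String :=
  l.map (fun p => pvSlug p.2)

@[simp] theorem pvSlugs_nil : pvSlugs [] = [] := rfl
@[simp] theorem pvSlugs_cons (p l) : pvSlugs (p :: l) = pvSlug p.2 :: pvSlugs l := rfl

theorem pvA_usage (counts : PySem.Dict String Int)
    (l : List (String × List (String × String)))
    (u : PySem.Dict String Int) (pm : PySem.Dict String (List (String × String)))
    (s : String) :
    ((l.foldl (pvStepA counts) (u, pm)).1).getD s 0 =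
      u.getD s 0 + (if counts.getD s 0 > 1 then ((pvSlugs l).count s : Int) else 0) := by
  induction l generalizing u pm with
  | nil => simp
  | cons p l ih =>
    simp only [List.foldl_cons, pvStepA]
    by_cases h : counts.getD (pvSlug p.2) 0 > 1
    · rw [if_pos h, ih]
      by_cases hs : s = pvSlug p.2
      · subst hs
        simp [PySem.Dict.getD_insert_self, h, List.count_cons_self]
        ring
      · rw [PySem.Dict.getD_insert_of_ne _ _ _ hs]
        simp [Ne.symm hs]
    · rw [if_neg h, ih]
      by_cases hs : s = pvSlug p.2
      · subst hs; simp [h]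
      · simp [Ne.symm hs]

theorem pvA_skip (counts : PySem.Dict String Int)
    (l : List (String × List (String × String)))
    (u : PySem.Dict String Int) (pm : PySem.Dict String (List (String × String)))
    (k : String) (hk : k ∉ l.map Prod.fst) :
    ((l.foldl (pvStepA counts) (u, pm)).2).getD k [] = pm.getD k [] := by
  induction l generalizing u pm with
  | nil => rfl
  | cons p l ih =>
    simp only [List.map_cons, List.mem_cons, not_or] at hk
    simp only [List.foldl_cons, pvStepA]
    by_cases h : counts.getD (pvSlug p.2) 0 > 1
    · rw [if_pos h, ih _ _ hk.2, PySem.Dict.getD_insert_of_ne _ _ _ hk.1]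
    · rw [if_neg h, ih _ _ hk.2]

theorem pvA_keys (counts : PySem.Dict String Int)
    (l : List (String × List (String × String)))
    (u : PySem.Dict String Int) (pm : PySem.Dict String (List (String × String)))
    (h : ∀ p ∈ l, pm.contains p.1 = true) :
    ((l.foldl (pvStepA counts) (u, pm)).2).keys = pm.keys := by
  induction l generalizing u pm with
  | nil => rfl
  | cons p l ih =>
    simp only [List.foldl_cons, pvStepA]
    by_cases hc : counts.getD (pvSlug p.2) 0 > 1
    · rw [if_pos hc, ih]
      · exact PySem.Dict.keys_insert_of_contains _ _ (h p (List.mem_cons_self ..))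
      · intro q hq
        rw [PySem.Dict.contains_insert]
        simp [h q (List.mem_cons_of_mem _ hq)]
    · rw [if_neg hc, ih]
      intro q hq; exact h q (List.mem_cons_of_mem _ hq)

theorem pvA_main (counts : PySem.Dict String Int)
    (l₁ l₂ : List (String × List (String × String)))
    (p : String × List (String × String))
    (u : PySem.Dict String Int) (pm : PySem.Dict String (List (String × String)))
    (h1 : p.1 ∉ l₁.map Prod.fst) (h2 : p.1 ∉ l₂.map Prod.fst) :
    (((l₁ ++ p :: l₂).foldl (pvStepA counts) (u, pm)).2).getD p.1 [] =
      if counts.getD (pvSlug p.2) 0 > 1 then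
        ((PySem.Dict.mk p.2).insert "slug"
          (pvSlug p.2 ++ "-" ++
            PySem.Int.toStr (u.getD (pvSlug p.2) 0 + ((pvSlugs l₁).count (pvSlug p.2) : Int) + 1))).items
      else pm.getD p.1 [] := by
  rw [List.foldl_append, List.foldl_cons]
  by_cases h : counts.getD (pvSlug p.2) 0 > 1
  · rw [if_pos h]
    have hstep : pvStepA counts (List.foldl (pvStepA counts) (u, pm) l₁) p =
        ((List.foldl (pvStepA counts) (u, pm) l₁).1.insert (pvSlug p.2)
          ((List.foldl (pvStepA counts) (u, pm) l₁).1.getD (pvSlug p.2) 0 + 1),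
         (List.foldl (pvStepA counts) (u, pm) l₁).2.insert p.1
           ((PySem.Dict.mk p.2).insert "slug"
             (pvSlug p.2 ++ "-" ++
               PySem.Int.toStr ((List.foldl (pvStepA counts) (u, pm) l₁).1.getD (pvSlug p.2) 0 + 1))).items) := by
      simp only [pvStepA, if_pos h]
    rw [hstep, pvA_skip _ _ _ _ _ h2]
    simp only [PySem.Dict.getD_insert_self]
    rw [pvA_usage, if_pos h]

  · rw [if_neg h]
    have hstep : pvStepA counts (List.foldl (pvStepA counts) (u, pm) l₁) p =
        List.foldl (pvStepA counts) (u, pm) l₁ := by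
      simp only [pvStepA, if_neg h]
    rw [hstep, pvA_skip _ _ _ _ _ h2]
    rw [pvA_skip _ _ _ _ _ h1]

theorem pvB_inner_fst (slug : String) (ms : List String)
    (st : Int × PySem.Dict String (List (String × String))) :
    (ms.foldl (pvStepBInner slug) st).1 = st.1 + ms.length := by
  induction ms generalizing st with
  | nil => simp
  | cons a ms ih =>
    simp only [List.foldl_cons, pvStepBInner, ih, List.length_cons]
    push_cast; ring

theorem pvB_inner_skip (slug : String) (ms : List String)
    (st : Int × PySem.Dict String (List (String × String)))
    (k : String) (hk : k ∉ ms) :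
    ((ms.foldl (pvStepBInner slug) st).2).getD k [] = st.2.getD k [] := by
  induction ms generalizing st with
  | nil => rfl
  | cons a ms ih =>
    simp only [List.mem_cons, not_or] at hk
    simp only [List.foldl_cons, pvStepBInner]
    rw [ih _ hk.2, PySem.Dict.getD_modify_of_ne _ _ _ hk.1]

theorem pvB_inner_main (slug : String) (m₁ m₂ : List String) (k : String)
    (st : Int × PySem.Dict String (List (String × String)))
    (h1 : k ∉ m₁) (h2 : k ∉ m₂) :
    (((m₁ ++ k :: m₂).foldl (pvStepBInner slug) st).2).getD k [] =
      ((PySem.Dict.mk (st.2.getD k [])).insert "slug"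
        (slug ++ "-" ++ PySem.Int.toStr (st.1 + m₁.length))).items := by
  rw [List.foldl_append, List.foldl_cons]
  rw [pvB_inner_skip _ _ _ _ h2]
  simp only [pvStepBInner]
  rw [PySem.Dict.getD_modify_self, pvB_inner_skip _ _ _ _ h1, pvB_inner_fst]

theorem pvB_outer_skip (gs : List (String × List String))
    (pm : PySem.Dict String (List (String × String))) (k : String)
    (h : ∀ g ∈ gs, k ∉ g.2) :
    ((gs.foldl pvStepB pm)).getD k [] = pm.getD k [] := by
  induction gs generalizing pm with
  | nil => rfl
  | cons g gs ih =>
    simp only [List.foldl_cons, pvStepB]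
    by_cases hc : g.2.length > 1
    · rw [if_pos hc, ih]
      · exact pvB_inner_skip _ _ _ _ (h g (List.mem_cons_self ..))
      · intro q hq; exact h q (List.mem_cons_of_mem _ hq)
    · rw [if_neg hc, ih]
      intro q hq; exact h q (List.mem_cons_of_mem _ hq)

theorem pvB_inner_contains (slug : String) (ms : List String)
    (st : Int × PySem.Dict String (List (String × String)))
    (k : String) (hk : st.2.contains k = true) :
    ((ms.foldl (pvStepBInner slug) st).2).contains k = true := by
  induction ms generalizing st with
  | nil => exact hk
  | cons a ms ih =>
    simp only [List.foldl_cons, pvStepBInner]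
    exact ih _ (by rw [PySem.Dict.contains_modify]; simp [hk])

theorem pvB_inner_keys (slug : String) (ms : List String)
    (st : Int × PySem.Dict String (List (String × String)))
    (h : ∀ n ∈ ms, st.2.contains n = true) :
    ((ms.foldl (pvStepBInner slug) st).2).keys = st.2.keys := by
  induction ms generalizing st with
  | nil => rfl
  | cons a ms ih =>
    simp only [List.foldl_cons, pvStepBInner]
    rw [ih]
    · rw [PySem.Dict.keys_modify,
        PySem.Dict.keys_insert_of_contains _ _ (h a (List.mem_cons_self ..))]
    · intro n hn
      rw [PySem.Dict.contains_modify]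
      simp [h n (List.mem_cons_of_mem _ hn)]

theorem pvB_keys (gs : List (String × List String))
    (pm : PySem.Dict String (List (String × String)))
    (h : ∀ g ∈ gs, ∀ n ∈ g.2, pm.contains n = true) :
    (gs.foldl pvStepB pm).keys = pm.keys := by
  induction gs generalizing pm with
  | nil => rfl
  | cons g gs ih =>
    simp only [List.foldl_cons, pvStepB]
    by_cases hc : g.2.length > 1
    · rw [if_pos hc, ih]
      · exact pvB_inner_keys _ _ _ (h g (List.mem_cons_self ..))
      · intro q hq n hn
        exact pvB_inner_contains _ _ _ _ (h q (List.mem_cons_of_mem _ hq) n hn)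
    · rw [if_neg hc, ih]
      intro q hq; exact h q (List.mem_cons_of_mem _ hq)

def pvMembers (pn : List (String × List (String × String))) (s : String) : List String :=
  (pn.filter (fun p => pvSlug p.2 == s)).map Prod.fst

theorem pvCounts_getD (pn : List (String × List (String × String))) (s : String) :
    (pn.foldl (fun c p => c.insert (pvSlug p.2) (c.getD (pvSlug p.2) 0 + 1))
      PySem.Dict.empty).getD s 0 = ((pvSlugs pn).count s : Int) := by
  have h := List.foldl_map (f := fun p : String × List (String × String) => pvSlug p.2)
    (g := fun (c : PySem.Dict String Int) x => c.insert x (c.getD x 0 + 1)) (l := pn)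
    (init := PySem.Dict.empty)
  rw [pvSlugs, ← h, PySem.Dict.getD_foldl_insert_add_one, PySem.Dict.getD_empty, zero_add]

theorem pvGroups_getD (pn : List (String × List (String × String))) (s : String) :
    (pn.foldl (fun g p => g.modify (pvSlug p.2) [] (fun l => l ++ [p.1]))
      PySem.Dict.empty).getD s [] = pvMembers pn s := by
  have h := List.foldl_map (f := fun p : String × List (String × String) => (pvSlug p.2, p.1))
    (g := fun (d : PySem.Dict String (List String)) q => d.modify q.1 [] (fun l => l ++ [q.2]))
    (l := pn) (init := PySem.Dict.empty)
  rw [← h, PySem.Dict.getD_foldl_modify_append, PySem.Dict.getD_empty, List.nil_append]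
  rw [pvMembers, List.filter_map, List.map_map]
  rfl

theorem pvMembers_length (pn : List (String × List (String × String))) (s : String) :
    (pvMembers pn s).length = (pvSlugs pn).count s := by
  induction pn with
  | nil => rfl
  | cons p l ih =>
    by_cases h : pvSlug p.2 = s
    · simp [pvMembers, h] at ih ⊢; omega
    · simp [pvMembers, h] at ih ⊢; omega

theorem pvMembers_subset (pn : List (String × List (String × String))) (s : String) :
    ∀ k ∈ pvMembers pn s, k ∈ pn.map Prod.fst := by
  intro k hk
  rw [pvMembers] at hk
  obtain ⟨q, hq, rfl⟩ := List.mem_map.1 hk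
  exact List.mem_map_of_mem (List.mem_of_mem_filter hq)

theorem pvMembers_append (l₁ l₂ : List (String × List (String × String))) (s : String) :
    pvMembers (l₁ ++ l₂) s = pvMembers l₁ s ++ pvMembers l₂ s := by
  simp [pvMembers, List.filter_append]

theorem pv_nodup_middle {α : Type} (l₁ l₂ : List α) (a : α)
    (h : (l₁ ++ a :: l₂).Nodup) : a ∉ l₁ ∧ a ∉ l₂ := by
  rw [List.nodup_middle, List.nodup_cons, List.mem_append] at h
  exact ⟨fun h1 => h.1 (Or.inl h1), fun h2 => h.1 (Or.inr h2)⟩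

theorem pv_main (pn : List (String × List (String × String)))
    (hn : (pn.map Prod.fst).Nodup) :
    ensure_unique_slugs pn = ensure_unique_slugs_alt pn := by
  simp only [ensure_unique_slugs, ensure_unique_slugs_alt]
  set counts : PySem.Dict String Int :=
    pn.foldl (fun c p => c.insert (pvSlug p.2) (c.getD (pvSlug p.2) 0 + 1))
      PySem.Dict.empty with hcounts
  set groups : PySem.Dict String (List String) :=
    pn.foldl (fun g p => g.modify (pvSlug p.2) [] (fun l => l ++ [p.1]))
      PySem.Dict.empty with hgroups
  set Da : PySem.Dict String (List (String × String)) :=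
    (pn.foldl (pvStepA counts) (PySem.Dict.empty, PySem.Dict.mk pn)).2 with hDa
  set Db : PySem.Dict String (List (String × String)) :=
    groups.items.foldl pvStepB (PySem.Dict.mk pn) with hDb
  -- facts about groups
  have hgk : groups.keys.Nodup := by
    rw [hgroups]
    exact PySem.Dict.nodup_keys_foldl_modify_key pn (fun p => pvSlug p.2) []
      (fun _ p l => l ++ [p.1]) PySem.Dict.empty (by simp [PySem.Dict.keys_empty])
  have hitems : ∀ g ∈ groups.items, g.2 = pvMembers pn g.1 := by
    intro g hg
    have h1 : groups.get? g.1 = some g.2 :=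
      PySem.Dict.get?_of_mem_items groups (by simpa using hg) hgk
    have h2 := PySem.Dict.getD_of_get?_eq_some groups [] h1
    rw [hgroups, pvGroups_getD] at h2
    exact h2.symm
  -- keys of both results
  have hcontains : ∀ q ∈ pn, (PySem.Dict.mk pn).contains q.1 = true := by
    intro q hq
    rw [PySem.Dict.contains_iff_mem_keys, PySem.Dict.keys_mk]
    exact List.mem_map_of_mem hq
  have hka : Da.keys = pn.map Prod.fst := by
    rw [hDa, pvA_keys _ _ _ _ hcontains, PySem.Dict.keys_mk]
  have hkb : Db.keys = pn.map Prod.fst := by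
    rw [hDb, pvB_keys]
    · rw [PySem.Dict.keys_mk]
    · intro g hg n hn'
      rw [hitems g hg] at hn'
      rw [PySem.Dict.contains_iff_mem_keys, PySem.Dict.keys_mk]
      exact pvMembers_subset pn g.1 n hn'
  -- pointwise values agree
  have hpt : ∀ k ∈ pn.map Prod.fst, Da.getD k [] = Db.getD k [] := by
    intro k hk
    obtain ⟨p, hp, hp1⟩ := List.mem_map.1 hk
    obtain ⟨l₁, l₂, hpn⟩ := List.append_of_mem hp
    subst hp1
    have hnd : p.1 ∉ l₁.map Prod.fst ∧ p.1 ∉ l₂.map Prod.fst := by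
      rw [hpn, List.map_append, List.map_cons] at hn
      exact pv_nodup_middle _ _ _ hn
    set s := pvSlug p.2 with hs
    -- the original value at key p.1
    have horig : (PySem.Dict.mk pn).getD p.1 [] = p.2 := by
      refine PySem.Dict.getD_of_mem_items _ ?_ (by rw [PySem.Dict.keys_mk]; exact hn) []
      show (p.1, p.2) ∈ pn
      rw [Prod.mk.eta]; exact hp
    -- A's value
    have hA : Da.getD p.1 [] =
        if counts.getD s 0 > 1 then
          ((PySem.Dict.mk p.2).insert "slug"
            (s ++ "-" ++ PySem.Int.toStr
              (PySem.Dict.empty.getD s 0 + ((pvSlugs l₁).count s : Int) + 1))).items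
        else (PySem.Dict.mk pn).getD p.1 [] := by
      rw [hDa, hpn]
      exact pvA_main counts l₁ l₂ p _ _ hnd.1 hnd.2
    -- B's preliminaries: p.1's group
    have hkmem : p.1 ∈ pvMembers pn s := by
      rw [pvMembers]
      refine List.mem_map_of_mem (List.mem_filter.2 ⟨hp, ?_⟩)
      simp [hs]
    have hc : groups.contains s = true := by
      by_contra hcf
      have : groups.getD s [] = [] :=
        PySem.Dict.getD_of_not_contains _ _ (by simpa using hcf)
      rw [hgroups, pvGroups_getD] at this
      rw [this] at hkmem
      exact (List.not_mem_nil) hkmem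
    obtain ⟨ms, hms⟩ : ∃ ms, groups.get? s = some ms := by
      rw [PySem.Dict.contains_eq_isSome_get?] at hc
      exact Option.isSome_iff_exists.mp hc
    have hmsval : ms = pvMembers pn s := by
      have := PySem.Dict.getD_of_get?_eq_some groups [] hms
      rw [hgroups, pvGroups_getD] at this
      exact this.symm
    have hmem : (s, ms) ∈ groups.items := PySem.Dict.mem_items_of_get?_eq_some _ hms
    obtain ⟨t₁, t₂, hsplit⟩ := List.append_of_mem hmem
    have hsnot : s ∉ t₁.map Prod.fst ∧ s ∉ t₂.map Prod.fst := by
      have hgk' := hgk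
      rw [show groups.keys = groups.items.map Prod.fst from rfl, hsplit,
        List.map_append, List.map_cons] at hgk'
      exact pv_nodup_middle _ _ _ hgk'
    -- no other group contains p.1
    have hnotin : ∀ t, t = t₁ ∨ t = t₂ → ∀ g ∈ t, p.1 ∉ g.2 := by
      intro t ht g hg hkg
      have hgitems : g ∈ groups.items := by
        rw [hsplit]
        rcases ht with rfl | rfl
        · exact List.mem_append_left _ hg
        · exact List.mem_append_right _ (List.mem_cons_of_mem _ hg)
      rw [hitems g hgitems, pvMembers] at hkg
      obtain ⟨q, hq, hq1⟩ := List.mem_map.1 hkg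
      have hqpn := List.mem_of_mem_filter hq
      have hqs : pvSlug q.2 = g.1 := by
        have := (List.mem_filter.1 hq).2
        simpa using this
      -- q = p since names are nodup
      have hqp : q = p := by
        rw [hpn] at hqpn
        rcases List.mem_append.1 hqpn with h' | h'
        · exact absurd (hq1 ▸ List.mem_map_of_mem h') hnd.1
        · rcases List.mem_cons.1 h' with h'' | h''
          · exact h''
          · exact absurd (hq1 ▸ List.mem_map_of_mem h'') hnd.2
      have : g.1 = s := by rw [← hqs, hqp]
      rcases ht with rfl | rfl
      · exact hsnot.1 (this ▸ List.mem_map_of_mem hg)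
      · exact hsnot.2 (this ▸ List.mem_map_of_mem hg)
    -- B's value
    have hB0 : Db.getD p.1 [] =
        (pvStepB (t₁.foldl pvStepB (PySem.Dict.mk pn)) (s, ms)).getD p.1 [] := by
      rw [hDb, hsplit, List.foldl_append, List.foldl_cons]
      exact pvB_outer_skip t₂ _ _ (hnotin t₂ (Or.inr rfl))
    have hB1 : (t₁.foldl pvStepB (PySem.Dict.mk pn)).getD p.1 [] = p.2 := by
      rw [pvB_outer_skip t₁ _ _ (hnotin t₁ (Or.inl rfl)), horig]
    -- count/length bookkeeping
    have hmslen : ms.length = (pvSlugs pn).count s := by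
      rw [hmsval, pvMembers_length]
    have hcnt : counts.getD s 0 = ((pvSlugs pn).count s : Int) := by
      rw [hcounts, pvCounts_getD]
    -- split members around p.1
    have hmsdecomp : ms = pvMembers l₁ s ++ p.1 :: pvMembers l₂ s := by
      rw [hmsval, hpn, pvMembers_append]
      congr 1
      show pvMembers (p :: l₂) s = p.1 :: pvMembers l₂ s
      simp [pvMembers, hs]
    have hm1 : p.1 ∉ pvMembers l₁ s :=
      fun h' => hnd.1 (pvMembers_subset l₁ s _ h')
    have hm2 : p.1 ∉ pvMembers l₂ s :=
      fun h' => hnd.2 (pvMembers_subset l₂ s _ h')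
    rw [hA, hB0]
    by_cases hbig : 1 < (pvSlugs pn).count s
    · rw [if_pos (by rw [hcnt]; exact_mod_cast hbig)]
      rw [pvStepB, if_pos (by rw [hmslen]; exact hbig)]
      rw [hmsdecomp]
      rw [pvB_inner_main s _ _ _ _ hm1 hm2]
      rw [hB1]
      have harg : PySem.Dict.empty.getD s 0 + ((pvSlugs l₁).count s : Int) + 1 =
          1 + ((pvMembers l₁ s).length : Int) := by
        rw [PySem.Dict.getD_empty, pvMembers_length]; ring
      rw [harg]
    · rw [if_neg (by rw [hcnt]; exact_mod_cast hbig)]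
      rw [pvStepB, if_neg (by rw [hmslen]; exact hbig)]
      rw [horig, pvB_outer_skip t₁ _ _ (hnotin t₁ (Or.inl rfl)), horig]
  -- assemble: items of both dicts as maps over the same key list
  rw [PySem.Dict.items_eq_map_keys Da (by rw [hka]; exact hn) [],
      PySem.Dict.items_eq_map_keys Db (by rw [hkb]; exact hn) [],
      hka, hkb]
  exact List.map_congr_left (fun k hk => by rw [hpt k hk])

-- ===== VERDICT (by name: the statement is the Claim_ definition above) =====
theorem ensure_unique_slugs_spec : Claim_equal_ensure_unique_slugs := by
  intro player_names _ hpre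
  show ensure_unique_slugs player_names = ensure_unique_slugs_alt player_names
  exact pv_main player_names hpre.1
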